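-- pv_equiv track=rewrite | github.com/AdamZhouSE/pythonHomework | Code/CodeRecords/2739/60876/258257.py | f
-- ===== SOURCE A (Python) =====
-- def f(k,n,start):
--     if k==1 and start<=n:
--         return[[n]]
--     elif k==1:
--         return[[]]
--     else:
--         temp=[]
--         for i in range(start,n//k+1):
--             result=f(k-1,n-i,i+1)
--             if result==[[]]:
--                 continue
--             else:
--                 for item in result:
--                     now=[i]
--                     for items in item:
--                         now.append(items)
--                     temp.append(now)
--         return temp
-- ===== SOURCE B (Python) =====
-- def f(k, n, start):
--     # Level-by-level (breadth-first) expansion instead of recursion.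
--     if k == 1:
--         return [[n]] if start <= n else [[]]
--     partials = [(n, start, [])]
--     for rk in range(k, 2, -1):
--         if not partials:
--             break
--         partials = [(rn - i, i + 1, pre + [i])
--                     for (rn, s, pre) in partials
--                     for i in range(s, rn // rk + 1)]
--     return [pre + [i, rn - i]
--             for (rn, s, pre) in partials
--             for i in range(s, rn // 2 + 1)
--             if rn - i > i]
-- ===== Notes on version B (the rewrite author's own statement) =====
-- stated objective: alternative
-- what changed: Replaces A's recursion (with its [[]] sentinel propagation) by a breadth-first, level-by-level expansion: a loop over the remaining length rk=k..3 that extends all partial states (remaining, next_start, prefix) at once via comprehensions, then one finishing pass for the last two elements.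
-- outside the precondition, e.g. on f(-1, -1, -1): A returns [], B returns [[-1, 0]]; on f(-1, 5, 100): A returns [], B returns []
import Mathlib
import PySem

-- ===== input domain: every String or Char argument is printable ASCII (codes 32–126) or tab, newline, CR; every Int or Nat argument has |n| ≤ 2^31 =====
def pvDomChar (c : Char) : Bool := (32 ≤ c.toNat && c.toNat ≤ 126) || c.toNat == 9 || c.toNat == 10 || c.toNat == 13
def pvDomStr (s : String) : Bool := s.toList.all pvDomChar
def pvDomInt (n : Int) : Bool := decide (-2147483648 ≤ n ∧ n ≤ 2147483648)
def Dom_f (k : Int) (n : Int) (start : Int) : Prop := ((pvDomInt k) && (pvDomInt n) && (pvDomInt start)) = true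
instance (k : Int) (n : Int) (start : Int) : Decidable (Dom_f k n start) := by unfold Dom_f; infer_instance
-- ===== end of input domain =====

-- B replaces A's recursion by an iterative level-by-level (breadth-first) expansion of partial states; same cost, different decomposition. Proven equal for k ≥ 1 (for k ≤ 0 A raises ZeroDivisionError or recurses out of the natural domain).

-- ===== PORT A =====
-- fuel-indexed transliteration of A's recursion; fuel = k.toNat suffices for every k ≥ 1
def fAux : Nat → Int → Int → Int → List (List Int)
  | 0, _, _, _ => []
  | fuel+1, k, n, start =>
    if k = 1 ∧ start ≤ n then [[n]]
    else if k = 1 then [[]]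
    else
      (PySem.List.pyRange start (PySem.Int.floordiv n k + 1) 1).foldl
        (fun temp i =>
          let result := fAux fuel (k-1) (n-i) (i+1)
          if result = [[]] then temp
          else temp ++ result.map (fun item => [i] ++ item))
        []

def f (k : Int) (n : Int) (start : Int) : List (List Int) := fAux k.toNat k n start

-- ===== PORT B =====
-- one level of B's expansion: extend every partial state by each admissible next element i
def pvLevelExt (rk : Int) (ps : List (Int × Int × List Int)) : List (Int × Int × List Int) :=
  ps.flatMap (fun t =>
    (PySem.List.pyRange t.2.1 (PySem.Int.floordiv t.1 rk + 1) 1).map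
      (fun i => (t.1 - i, i + 1, t.2.2 ++ [i])))

-- B's finishing pass: emit prefix ++ [i, rn - i] whenever rn - i > i
def pvFinish (ps : List (Int × Int × List Int)) : List (List Int) :=
  ps.flatMap (fun t =>
    (PySem.List.pyRange t.2.1 (PySem.Int.floordiv t.1 2 + 1) 1).filterMap
      (fun i => if t.1 - i > i then some (t.2.2 ++ [i, t.1 - i]) else none))

-- B's level loop 'for rk in range(k, 2, -1)' with its early exit ('if not partials: break'),
-- as a count-down recursion (range's laziness + break: the range is never materialized)
def pvLevels (rk : Int) (ps : List (Int × Int × List Int)) : List (Int × Int × List Int) :=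
  if 2 < rk then (if ps = [] then ps else pvLevels (rk - 1) (pvLevelExt rk ps)) else ps
termination_by (rk - 2).toNat
decreasing_by omega

def f_alt (k : Int) (n : Int) (start : Int) : List (List Int) :=
  if k = 1 then (if start ≤ n then [[n]] else [[]])
  else
    pvFinish (pvLevels k [(n, start, ([] : List Int))])

-- ===== PRECONDITION & SPEC =====
-- Pre_ restricts to the natural domain k ≥ 1: at k = 0 A raises ZeroDivisionError, and for k < 0
-- A's value (when recursion happens to bottom out through empty ranges) is an accident of unbounded
-- recursion outside the function's purpose.
def Pre_f (k : Int) (n : Int) (start : Int) : Prop := 1 ≤ k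
instance (k : Int) (n : Int) (start : Int) : Decidable (Pre_f k n start) := by unfold Pre_f; infer_instance
def pvWitness_f : Int × Int × Int := (3, 9, 1)

def Spec_f (k : Int) (n : Int) (start : Int) (out : List (List Int)) : Prop := out = f_alt k n start
instance (k : Int) (n : Int) (start : Int) (out : List (List Int)) : Decidable (Spec_f k n start out) := by unfold Spec_f; infer_instance

-- ===== CLAIM (what is proved, stated in full; the proofs are below) =====
def Claim_equal_f : Prop := ∀ (k : Int) (n : Int) (start : Int), Dom_f k n start → Pre_f k n start → Spec_f k n start (f k n start)

-- ===== LEMMAS AND PROOFS =====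

theorem fAux_fuel : ∀ (f1 f2 : Nat) (k n s : Int), 1 ≤ k → k.toNat ≤ f1 → k.toNat ≤ f2 →
    fAux f1 k n s = fAux f2 k n s := by
  intro f1
  induction f1 with
  | zero => intro f2 k n s hk h1 h2; exfalso; omega
  | succ f1 ih =>
    intro f2 k n s hk h1 h2
    cases f2 with
    | zero => exfalso; omega
    | succ f2 =>
      by_cases hk1 : k = 1
      · simp [fAux, hk1]
      · simp only [fAux, hk1, false_and, if_false]
        congr 1
        funext temp i
        have h := ih f2 (k-1) (n-i) (i+1) (by omega) (by omega) (by omega)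
        simp [h]
theorem f_unfold (k n s : Int) (hk : 2 ≤ k) :
    f k n s = (PySem.List.pyRange s (PySem.Int.floordiv n k + 1) 1).foldl
      (fun temp i =>
        let result := f (k-1) (n-i) (i+1)
        if result = [[]] then temp
        else temp ++ result.map (fun item => [i] ++ item)) [] := by
  unfold f
  have hkt : k.toNat = (k.toNat - 1) + 1 := by omega
  rw [hkt]
  simp only [fAux, show ¬ k = 1 by omega, false_and, if_false]
  congr 1
  funext temp i
  have h := fAux_fuel (k.toNat - 1) (k-1).toNat (k-1) (n-i) (i+1) (by omega) (by omega) (le_refl _)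
  simp [h]

theorem f_flatMap (k n s : Int) (hk : 2 ≤ k) :
    f k n s = (PySem.List.pyRange s (PySem.Int.floordiv n k + 1) 1).flatMap
      (fun i =>
        if f (k-1) (n-i) (i+1) = [[]] then []
        else (f (k-1) (n-i) (i+1)).map (fun item => [i] ++ item)) := by
  rw [f_unfold k n s hk]
  have hstep : (fun (temp : List (List Int)) (i : Int) =>
        let result := f (k-1) (n-i) (i+1)
        if result = [[]] then temp
        else temp ++ result.map (fun item => [i] ++ item))
      = (fun temp i => temp ++ (if f (k-1) (n-i) (i+1) = [[]] then []
        else (f (k-1) (n-i) (i+1)).map (fun item => [i] ++ item))) := by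
    funext temp i
    by_cases h : f (k-1) (n-i) (i+1) = [[]] <;> simp [h]
  rw [hstep, PySem.List.foldl_append_eq_flatMap]
  simp

theorem f_ne_nil (k n s : Int) (hk : 2 ≤ k) : ∀ l ∈ f k n s, l ≠ [] := by
  rw [f_flatMap k n s hk]
  intro l hl
  rw [List.mem_flatMap] at hl
  obtain ⟨i, _, hl⟩ := hl
  split at hl
  · simp at hl
  · rw [List.mem_map] at hl
    obtain ⟨item, _, rfl⟩ := hl
    simp

theorem f_one (n s : Int) : f 1 n s = if s ≤ n then [[n]] else [[]] := by
  simp [f, fAux]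

theorem f_flatMap' (k n s : Int) (hk : 3 ≤ k) :
    f k n s = (PySem.List.pyRange s (PySem.Int.floordiv n k + 1) 1).flatMap
      (fun i => (f (k-1) (n-i) (i+1)).map (fun item => [i] ++ item)) := by
  rw [f_flatMap k n s (by omega)]
  apply List.flatMap_congr  -- maybe wrong name
  intro i _
  rw [if_neg]
  intro h
  have := f_ne_nil (k-1) (n-i) (i+1) (by omega) [] (by rw [h]; simp)
  exact this rfl
theorem flatMap_ite (l : List Int) (p : Int → Prop) [DecidablePred p] (g : Int → List Int) :
    l.flatMap (fun i => if p i then [g i] else []) =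
    l.filterMap (fun i => if p i then some (g i) else none) := by
  induction l with
  | nil => simp
  | cons a t ih => by_cases h : p a <;> simp [h, ih]

theorem f_two (n s : Int) : f 2 n s = pvFinish [(n, s, [])] := by
  rw [f_flatMap 2 n s le_rfl]
  unfold pvFinish
  simp only [List.flatMap_cons, List.flatMap_nil, List.append_nil, List.nil_append]
  rw [← flatMap_ite (PySem.List.pyRange s (PySem.Int.floordiv n 2 + 1) 1)
      (fun i => n - i > i) (fun i => [i, n - i])]
  apply List.flatMap_congr
  intro i _
  norm_num [f_one]
  by_cases h : i < n - i
  · simp [h, show ¬ n ≤ i + i by omega]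
  · simp [h, show n ≤ i + i by omega]
def pvPref (q : List Int) (t : Int × Int × List Int) : Int × Int × List Int := (t.1, t.2.1, q ++ t.2.2)

theorem levelExt_append (rk : Int) (ps qs : List (Int × Int × List Int)) :
    pvLevelExt rk (ps ++ qs) = pvLevelExt rk ps ++ pvLevelExt rk qs := by
  simp [pvLevelExt]

theorem levels_append (rs : List Int) : ∀ (ps qs : List (Int × Int × List Int)),
    rs.foldl (fun ps rk => pvLevelExt rk ps) (ps ++ qs) =
    rs.foldl (fun ps rk => pvLevelExt rk ps) ps ++ rs.foldl (fun ps rk => pvLevelExt rk ps) qs := by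
  induction rs with
  | nil => intro ps qs; rfl
  | cons a t ih => intro ps qs; simp only [List.foldl_cons, levelExt_append]; exact ih _ _

theorem levels_nil (rs : List Int) :
    rs.foldl (fun ps rk => pvLevelExt rk ps) [] = [] := by
  induction rs with
  | nil => rfl
  | cons a t ih => simpa [pvLevelExt] using ih

theorem pvFinish_append (ps qs : List (Int × Int × List Int)) :
    pvFinish (ps ++ qs) = pvFinish ps ++ pvFinish qs := by
  simp [pvFinish]

theorem hom_map_flat {α β : Type} (F : List α → List β)
    (h2 : ∀ ps qs, F (ps ++ qs) = F ps ++ F qs) (h0 : F [] = [])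
    (l : List Int) (g : Int → α) :
    F (l.map g) = l.flatMap (fun i => F [g i]) := by
  induction l with
  | nil => simpa using h0
  | cons a t ih =>
    have : (a :: t).map g = [g a] ++ t.map g := rfl
    rw [this, h2, ih, List.flatMap_cons]

theorem levelExt_pref (rk : Int) (q : List Int) (ps : List (Int × Int × List Int)) :
    pvLevelExt rk (ps.map (pvPref q)) = (pvLevelExt rk ps).map (pvPref q) := by
  simp only [pvLevelExt, pvPref, List.flatMap_map, List.map_flatMap, List.map_map]
  apply List.flatMap_congr
  intro t _
  apply List.map_congr_left
  intro i _
  simp [Function.comp, pvPref]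

theorem levels_pref (rs : List Int) (q : List Int) : ∀ (ps : List (Int × Int × List Int)),
    rs.foldl (fun ps rk => pvLevelExt rk ps) (ps.map (pvPref q)) =
    (rs.foldl (fun ps rk => pvLevelExt rk ps) ps).map (pvPref q) := by
  induction rs with
  | nil => intro ps; rfl
  | cons a t ih => intro ps; simp only [List.foldl_cons, levelExt_pref]; exact ih _

theorem pvFinish_pref (q : List Int) (ps : List (Int × Int × List Int)) :
    pvFinish (ps.map (pvPref q)) = (pvFinish ps).map (fun l => q ++ l) := by
  simp [pvFinish, pvPref, List.flatMap_map, List.map_flatMap, List.map_filterMap, apply_ite]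
theorem f_main : ∀ (m : Nat) (n s : Int),
    f ((m : Int) + 2) n s =
    pvFinish ((PySem.List.pyRange ((m : Int) + 2) 2 (-1)).foldl (fun ps rk => pvLevelExt rk ps)
      [(n, s, ([] : List Int))]) := by
  intro m
  induction m with
  | zero =>
    intro n s
    norm_num
    exact f_two n s
  | succ m ih =>
    intro n s
    have hcast : ((m + 1 : Nat) : Int) + 2 = (m : Int) + 3 := by push_cast; ring
    rw [hcast, PySem.List.pyRange_neg_one_cons (by omega : (2:Int) < (m : Int) + 3)]
    simp only [List.foldl_cons]
    have hrange : (m : Int) + 3 - 1 = (m : Int) + 2 := by ring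
    rw [hrange]
    have hfirst : pvLevelExt ((m : Int) + 3) [(n, s, ([] : List Int))] =
        (PySem.List.pyRange s (PySem.Int.floordiv n ((m : Int) + 3) + 1) 1).map
          (fun i => (n - i, i + 1, ([i] : List Int))) := by
      simp [pvLevelExt]
    rw [hfirst]
    set rs := PySem.List.pyRange ((m : Int) + 2) 2 (-1) with hrs
    have hF := hom_map_flat
      (fun ps => pvFinish (rs.foldl (fun ps rk => pvLevelExt rk ps) ps))
      (by intro ps qs; dsimp only; rw [levels_append, pvFinish_append])
      (by dsimp only; rw [levels_nil]; simp [pvFinish])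
      (PySem.List.pyRange s (PySem.Int.floordiv n ((m : Int) + 3) + 1) 1)
      (fun i => (n - i, i + 1, ([i] : List Int)))
    rw [hF, f_flatMap' ((m : Int) + 3) n s (by omega), hrange]
    apply List.flatMap_congr
    intro i _
    have hsing : [((n - i, i + 1, ([i] : List Int)))] =
        ([((n - i, i + 1, ([] : List Int)))]).map (pvPref [i]) := by
      simp [pvPref]
    rw [hsing, levels_pref, pvFinish_pref, ← ih (n - i) (i + 1)]

theorem pvLevels_eq_foldl : ∀ (e : Nat) (rk : Int), (rk - 2).toNat = e →
    ∀ (ps : List (Int × Int × List Int)),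
    pvLevels rk ps = (PySem.List.pyRange rk 2 (-1)).foldl (fun ps rk => pvLevelExt rk ps) ps := by
  intro e
  induction e with
  | zero =>
    intro rk he ps
    rw [pvLevels, if_neg (by omega), PySem.List.pyRange_neg_one_eq_nil (by omega)]
    rfl
  | succ e ih =>
    intro rk he ps
    rw [pvLevels, if_pos (by omega), PySem.List.pyRange_neg_one_cons (by omega)]
    simp only [List.foldl_cons]
    by_cases h : ps = []
    · subst h
      rw [if_pos rfl, show pvLevelExt rk [] = [] from rfl, levels_nil]
    · rw [if_neg h]
      exact ih (rk - 1) (by omega) _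

-- ===== VERDICT (by name: the statement is the Claim_ definition above) =====
theorem f_spec : Claim_equal_f := by
  intro k n s hd hp
  unfold Spec_f
  by_cases hk1 : k = 1
  · subst hk1
    simp [f_alt, f_one]
  · have hk2 : 2 ≤ k := by
      have : 1 ≤ k := hp
      omega
    obtain ⟨m, hm⟩ : ∃ m : Nat, k = (m : Int) + 2 := ⟨(k - 2).toNat, by omega⟩
    subst hm
    rw [f_main m n s, ← pvLevels_eq_foldl ((m : Int) + 2 - 2).toNat ((m : Int) + 2) rfl]
    unfold f_alt
    rw [if_neg (by omega)]
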